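-- pv_equiv track=rewrite | github.com/anvaavr/retrieval_final_project | my_searching_code.py | title_similarity
-- ===== SOURCE A (Python) =====
-- from collections import Counter, defaultdict
--
-- def title_similarity(D, doc_titles):
--     tuples = D.keys()
--     all_docs = [x[0] for x in tuples]
--     counter = Counter(all_docs)
--     sorted_docs = sorted(counter.keys(), key=lambda x: counter[x], reverse=True)
--
--     ret = []
--     for doc in sorted_docs:
--         if doc in doc_titles:
--             ret.append((doc, doc_titles[doc]))
--         else:
--             ret.append((doc, ''))
--     return ret
-- ===== SOURCE B (Python) =====
-- def title_similarity(D, doc_titles):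
--     counts = {}
--     for doc, _rest in D.keys():
--         counts[doc] = counts.get(doc, 0) + 1
--     buckets = {}
--     for doc, c in counts.items():
--         buckets.setdefault(c, []).append(doc)
--     ret = []
--     for c in range(max(buckets, default=0), 0, -1):
--         for doc in buckets.get(c, []):
--             ret.append((doc, doc_titles.get(doc, '')))
--     return ret
-- ===== Notes on version B (the rewrite author's own statement) =====
-- stated objective: alternative
-- what changed: Replaces A's comparison sort of the distinct docs by frequency with a counting/bucket sort: docs are grouped into buckets keyed by their count in first-seen order, and the result is emitted by scanning the counts from the maximum down to 1, which reproduces the stable descending order without ever comparing two docs.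
import Mathlib
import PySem

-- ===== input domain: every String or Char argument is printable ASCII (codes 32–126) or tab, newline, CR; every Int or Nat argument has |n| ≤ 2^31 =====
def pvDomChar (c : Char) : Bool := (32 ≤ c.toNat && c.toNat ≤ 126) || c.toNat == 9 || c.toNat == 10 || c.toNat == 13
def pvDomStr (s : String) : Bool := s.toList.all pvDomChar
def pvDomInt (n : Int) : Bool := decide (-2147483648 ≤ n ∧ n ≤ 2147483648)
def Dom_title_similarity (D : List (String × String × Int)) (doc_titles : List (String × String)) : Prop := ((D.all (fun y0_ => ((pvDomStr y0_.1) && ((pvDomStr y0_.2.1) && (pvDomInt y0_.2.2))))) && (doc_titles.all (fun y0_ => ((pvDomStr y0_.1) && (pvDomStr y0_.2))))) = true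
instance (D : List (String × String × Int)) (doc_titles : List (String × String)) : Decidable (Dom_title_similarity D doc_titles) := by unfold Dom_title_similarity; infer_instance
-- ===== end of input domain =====

-- B replaces A's comparison sort of the distinct docs by a counting/bucket pass: docs are
-- grouped by frequency in first-seen order and emitted for each count from the maximum down to 1.

-- ===== PORT A =====
-- D is a Python dict keyed by (str, str): its keys are the distinct pairs in first-insertion
-- order (values are never read); doc_titles is a dict built by inserting its pairs in order.
def title_similarity (D : List (String × String × Int)) (doc_titles : List (String × String)) : List (String × String) :=
  let tuples : List (String × String) := PySem.List.dedup (D.map (fun t => (t.1, t.2.1)))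
  let all_docs : List String := tuples.map (fun x => x.1)
  let counter : PySem.Dict String Int := PySem.Dict.counter all_docs
  let sorted_docs : List String := PySem.List.sorted counter.keys (fun x => counter.getD x 0) true
  let titles : PySem.Dict String String := doc_titles.foldl (fun d p => d.insert p.1 p.2) PySem.Dict.empty
  sorted_docs.foldl (fun ret doc =>
    if titles.contains doc then ret ++ [(doc, titles.getD doc "")]
    else ret ++ [(doc, "")]) []

-- ===== PORT B =====
-- literal port of Source B: manual count loop, buckets dict keyed by count, descending range pass
def title_similarity_alt (D : List (String × String × Int)) (doc_titles : List (String × String)) : List (String × String) :=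
  let keysD : List (String × String) := PySem.List.dedup (D.map (fun t => (t.1, t.2.1)))
  let counts : PySem.Dict String Int :=
    keysD.foldl (fun d t => d.modify t.1 0 (fun n => n + 1)) PySem.Dict.empty
  let buckets : PySem.Dict Int (List String) :=
    counts.items.foldl (fun d p => d.modify p.2 [] (fun l => l ++ [p.1])) PySem.Dict.empty
  let titles : PySem.Dict String String := doc_titles.foldl (fun d p => d.insert p.1 p.2) PySem.Dict.empty
  let maxc : Int := PySem.List.maxD buckets.keys (fun c => c) 0
  (PySem.List.pyRange maxc 0 (-1)).foldl (fun ret c =>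
    (buckets.getD c []).foldl (fun ret doc => ret ++ [(doc, titles.getD doc "")]) ret) []

-- ===== PRECONDITION & SPEC =====
def Spec_title_similarity (D : List (String × String × Int)) (doc_titles : List (String × String)) (out : List (String × String)) : Prop := out = title_similarity_alt D doc_titles
instance (D : List (String × String × Int)) (doc_titles : List (String × String)) (out : List (String × String)) : Decidable (Spec_title_similarity D doc_titles out) := by unfold Spec_title_similarity; infer_instance

-- ===== CLAIM (what is proved, stated in full; the proofs are below) =====
def Claim_equal_title_similarity : Prop := ∀ (D : List (String × String × Int)) (doc_titles : List (String × String)), Dom_title_similarity D doc_titles → Spec_title_similarity D doc_titles (title_similarity D doc_titles)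

-- ===== LEMMAS AND PROOFS =====

-- insertBy skips a prefix none of whose elements the new element goes before
theorem pv_insertBy_skip {α : Type} (bf : α → α → Bool) (x : α) (l r : List α)
    (h : ∀ y ∈ l, bf x y = false) :
    PySem.List.insertBy bf x (l ++ r) = l ++ PySem.List.insertBy bf x r := by
  induction l with
  | nil => simp
  | cons y t ih =>
    have hy : bf x y = false := h y (by simp)
    simp only [List.cons_append, PySem.List.insertBy, hy, Bool.false_eq_true, if_false]
    exact congrArg (y :: ·) (ih (fun z hz => h z (by simp [hz])))

-- insertBy puts the element in front when it goes before everything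
theorem pv_insertBy_front {α : Type} (bf : α → α → Bool) (x : α) (r : List α)
    (h : ∀ y ∈ r, bf x y = true) :
    PySem.List.insertBy bf x r = x :: r := by
  cases r with
  | nil => simp [PySem.List.insertBy]
  | cons y t => simp [PySem.List.insertBy, h y (by simp)]

-- inserting x into a bucketed list appends it to the end of its own bucket
theorem pv_ins_bucket {α : Type} (f : α → Int) (x : α) (cs : List Int) (p : List α)
    (hx : f x ∈ cs) (hs : cs.Pairwise (· > ·)) :
    PySem.List.insertBy (fun a b => decide (f b < f a)) x
        (cs.flatMap (fun c => p.filter (fun y => f y == c)))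
      = cs.flatMap (fun c => (p ++ [x]).filter (fun y => f y == c)) := by
  induction cs with
  | nil => simp at hx
  | cons c cs ih =>
    rcases List.pairwise_cons.mp hs with ⟨hgt, hs'⟩
    simp only [List.flatMap_cons]
    by_cases hc : f x = c
    · rw [pv_insertBy_skip]
      · rw [pv_insertBy_front]
        · have h1 : (p ++ [x]).filter (fun y => f y == c) = p.filter (fun y => f y == c) ++ [x] := by
            simp [List.filter_append, hc]
          have h2 : cs.flatMap (fun c' => (p ++ [x]).filter (fun y => f y == c'))
              = cs.flatMap (fun c' => p.filter (fun y => f y == c')) := by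
            rw [List.flatMap_def, List.flatMap_def]
            refine congrArg List.flatten (List.map_congr_left ?_)
            intro c' hc'
            have : f x ≠ c' := by have := hgt c' hc'; omega
            simp [List.filter_append, this]
          rw [h1, h2]
          simp
        · intro y hy
          rcases List.mem_flatMap.mp hy with ⟨c', hc', hy'⟩
          have : f y = c' := by simpa using (List.of_mem_filter hy')
          have : f y < f x := by have := hgt c' hc'; omega
          simpa using this
      · intro y hy
        have : f y = c := by simpa using (List.of_mem_filter hy)
        simp [this, hc]
    · have hx' : f x ∈ cs := by
        rcases List.mem_cons.mp hx with h | h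
        · exact absurd h hc
        · exact h
      rw [pv_insertBy_skip]
      · rw [ih hx' hs']
        have h1 : (p ++ [x]).filter (fun y => f y == c) = p.filter (fun y => f y == c) := by
          simp [List.filter_append, hc]
        rw [h1]
      · intro y hy
        have hyc : f y = c := by simpa using (List.of_mem_filter hy)
        have : ¬ (f y < f x) := by have := hgt (f x) hx'; omega
        simpa using this

theorem pv_pairwise_gt_range (M : Int) : (PySem.List.pyRange M 0 (-1)).Pairwise (· > ·) := by
  rw [PySem.List.pyRange_neg_one_eq_reverse]
  exact List.pairwise_reverse.mpr (PySem.List.pairwise_lt_pyRange_one 1 (M + 1))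

-- the insertion-sort fold over ks, started from the bucketed form of p, buckets p ++ ks
theorem pv_foldl_insertBy_flat {α : Type} (f : α → Int) (M : Int) (l p : List α)
    (hl : ∀ y ∈ l, 0 < f y ∧ f y ≤ M) :
    l.foldl (fun acc x => PySem.List.insertBy (fun a b => decide (f b < f a)) x acc)
        ((PySem.List.pyRange M 0 (-1)).flatMap (fun c => p.filter (fun y => f y == c)))
      = (PySem.List.pyRange M 0 (-1)).flatMap (fun c => (p ++ l).filter (fun y => f y == c)) := by
  induction l generalizing p with
  | nil => simp
  | cons x t ih =>
    simp only [List.foldl_cons]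
    rw [pv_ins_bucket f x _ p
      (PySem.List.mem_pyRange_neg_one.mpr ⟨(hl x (by simp)).1, (hl x (by simp)).2⟩)
      (pv_pairwise_gt_range M)]
    rw [ih (p ++ [x]) (fun y hy => hl y (by simp [hy]))]
    simp

-- Python's stable reverse sort by key f is the descending bucket concatenation
theorem pv_sorted_rev_flat {α : Type} (f : α → Int) (M : Int) (ks : List α)
    (h : ∀ k ∈ ks, 0 < f k ∧ f k ≤ M) :
    PySem.List.sorted ks f true
      = (PySem.List.pyRange M 0 (-1)).flatMap (fun c => ks.filter (fun y => f y == c)) := by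
  rw [PySem.List.sorted_rev_eq_foldl_insertBy]
  have h0 : ((PySem.List.pyRange M 0 (-1)).flatMap
      (fun c => ([] : List α).filter (fun y => f y == c))) = [] := by
    simp [List.flatMap_eq_nil_iff]
  have h1 := pv_foldl_insertBy_flat f M ks [] h
  rw [h0] at h1
  simpa using h1

-- B-side computation helpers and the pieces of the equivalence proof

theorem pv_foldl_precomp {α β γ : Type} (g : γ → β → γ) (f : α → β) (l : List α) (init : γ) :
    List.foldl (fun acc x => g acc (f x)) init l = List.foldl g init (l.map f) := by
  induction l generalizing init with
  | nil => rfl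
  | cons a t ih => simpa using ih (g init (f a))

theorem pv_counts (ks2 : List (String × String)) :
    List.foldl (fun d t => PySem.Dict.modify d t.1 0 (fun n => n + 1)) PySem.Dict.empty ks2
      = PySem.Dict.counter (ks2.map (fun x => x.1)) :=
  (pv_foldl_precomp (fun d x => PySem.Dict.modify d x 0 (fun n => n + 1))
    (fun t : String × String => t.1) ks2 PySem.Dict.empty).trans
    (PySem.Dict.counter_eq_foldl _).symm

theorem pv_swapfold (items : List (String × Int)) :
    List.foldl (fun d p => PySem.Dict.modify d p.2 [] (fun l => l ++ [p.1])) PySem.Dict.empty items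
      = List.foldl (fun d p => PySem.Dict.modify d p.1 [] (fun l => l ++ [p.2])) PySem.Dict.empty
          (items.map (fun p => (p.2, p.1))) :=
  pv_foldl_precomp (fun d p => PySem.Dict.modify d p.1 [] (fun l => l ++ [p.2]))
    (fun p : String × Int => (p.2, p.1)) items PySem.Dict.empty

theorem pv_bucket_getD (ad ks : List String) (c : Int) :
    (List.foldl (fun d p => PySem.Dict.modify d p.1 [] (fun l => l ++ [p.2])) PySem.Dict.empty
        (ks.map (fun k => (((List.count k ad : Nat) : Int), k)))).getD c []
      = ks.filter (fun k => ((List.count k ad : Nat) : Int) == c) := by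
  rw [PySem.Dict.getD_foldl_modify_append]
  simp [PySem.Dict.getD_of_not_contains, PySem.Dict.contains_empty, List.filter_map,
    List.map_map, Function.comp_def]

theorem pv_update_empty_keys (xs : List Int) :
    PySem.Set.update (PySem.Dict.empty : PySem.Dict Int (List String)).keys xs
      = PySem.Set.ofList xs := rfl

theorem pv_bucket_keys (ad ks : List String) :
    (List.foldl (fun d p => PySem.Dict.modify d p.1 [] (fun l => l ++ [p.2])) PySem.Dict.empty
        (ks.map (fun k => (((List.count k ad : Nat) : Int), k)))).keys
      = PySem.Set.ofList (ks.map (fun k => ((List.count k ad : Nat) : Int))) := by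
  have h := PySem.Dict.keys_foldl_modify_key (ks.map (fun k => (((List.count k ad : Nat) : Int), k)))
      (fun p => p.1) [] (fun _ p => fun l => l ++ [p.2]) PySem.Dict.empty
  simpa [pv_update_empty_keys, List.map_map, Function.comp_def] using h

theorem pv_le_maxD (vals : List Int) (v : Int) (hv : v ∈ vals) :
    v ≤ PySem.List.maxD (PySem.Set.ofList vals) (fun c => c) 0 := by
  cases h : PySem.List.max? (PySem.Set.ofList vals) (fun c => c) with
  | none =>
      have hnil : PySem.Set.ofList vals = [] := (PySem.List.max?_eq_none_iff _ _).mp h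
      have hv' : v ∈ PySem.Set.ofList vals := (PySem.Set.mem_ofList _ _).mpr hv
      rw [hnil] at hv'
      simp at hv'
  | some m =>
      have hle := PySem.List.max?_isMax h v ((PySem.Set.mem_ofList _ _).mpr hv)
      simpa [PySem.List.maxD, h] using hle

theorem pv_foldl_title (titles : PySem.Dict String String) (l : List String)
    (acc : List (String × String)) :
    l.foldl (fun ret doc =>
        if titles.contains doc then ret ++ [(doc, titles.getD doc "")] else ret ++ [(doc, "")]) acc
      = acc ++ l.map (fun doc => (doc, titles.getD doc "")) := by
  induction l generalizing acc with
  | nil => simp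
  | cons x t ih =>
      by_cases h : titles.contains x = true
      · simp [h, ih]
      · have h' : titles.contains x = false := by simpa using h
        simp [h', PySem.Dict.getD_of_not_contains titles "" h', ih]

theorem pv_main (ks2 : List (String × String)) (titles : PySem.Dict String String) :
    List.foldl
      (fun ret doc =>
        if titles.contains doc then ret ++ [(doc, titles.getD doc "")] else ret ++ [(doc, "")])
      []
      (PySem.List.sorted (PySem.Dict.counter (ks2.map (fun x => x.1))).keys
        (fun x => (PySem.Dict.counter (ks2.map (fun x => x.1))).getD x 0) true)
    =
    List.foldl
      (fun ret c =>
        List.foldl (fun ret doc => ret ++ [(doc, titles.getD doc "")]) ret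
          ((List.foldl (fun d p => PySem.Dict.modify d p.2 [] (fun l => l ++ [p.1]))
              PySem.Dict.empty
              (List.foldl (fun d t => PySem.Dict.modify d t.1 0 (fun n => n + 1))
                  PySem.Dict.empty ks2).items).getD c []))
      []
      (PySem.List.pyRange
        (PySem.List.maxD
          (List.foldl (fun d p => PySem.Dict.modify d p.2 [] (fun l => l ++ [p.1]))
              PySem.Dict.empty
              (List.foldl (fun d t => PySem.Dict.modify d t.1 0 (fun n => n + 1))
                  PySem.Dict.empty ks2).items).keys
          (fun c => c) 0)
        0 (-1)) := by
  have hb : ∀ k ∈ PySem.Set.ofList (ks2.map (fun x => x.1)),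
      0 < ((List.count k (ks2.map (fun x => x.1)) : Nat) : Int) ∧
      ((List.count k (ks2.map (fun x => x.1)) : Nat) : Int) ≤
        PySem.List.maxD (PySem.Set.ofList ((PySem.Set.ofList (ks2.map (fun x => x.1))).map
          (fun k => ((List.count k (ks2.map (fun x => x.1)) : Nat) : Int)))) (fun c => c) 0 := by
    intro k hk
    have hmem : k ∈ ks2.map (fun x => x.1) := (PySem.Set.mem_ofList _ _).mp hk
    refine ⟨?_, ?_⟩
    · exact_mod_cast List.count_pos_iff.mpr hmem
    · exact pv_le_maxD _ _ (List.mem_map.mpr ⟨k, hk, rfl⟩)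
  rw [pv_counts ks2, PySem.Dict.items_counter, pv_swapfold]
  simp only [List.map_map, Function.comp_def]
  rw [pv_bucket_keys]
  simp only [pv_bucket_getD]
  rw [PySem.Dict.keys_counter]
  rw [show (fun x => (PySem.Dict.counter (ks2.map (fun x => x.1))).getD x 0)
        = (fun k => ((List.count k (ks2.map (fun x => x.1)) : Nat) : Int))
      from funext (fun x => PySem.Dict.getD_counter _ x)]
  rw [pv_foldl_title]
  rw [pv_sorted_rev_flat (fun k => ((List.count k (ks2.map (fun x => x.1)) : Nat) : Int))
      (PySem.List.maxD (PySem.Set.ofList ((PySem.Set.ofList (ks2.map (fun x => x.1))).map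
        (fun k => ((List.count k (ks2.map (fun x => x.1)) : Nat) : Int)))) (fun c => c) 0)
      (PySem.Set.ofList (ks2.map (fun x => x.1))) hb]
  simp only [PySem.List.foldl_append_singleton_eq_map, PySem.List.foldl_append_eq_flatMap,
    List.map_flatMap, List.nil_append]

-- ===== VERDICT (by name: the statement is the Claim_ definition above) =====
theorem title_similarity_spec : Claim_equal_title_similarity := by
  intro D doc_titles _hdom
  show title_similarity D doc_titles = title_similarity_alt D doc_titles
  exact pv_main (PySem.List.dedup (D.map (fun t => (t.1, t.2.1))))
    (List.foldl (fun d p => PySem.Dict.insert d p.1 p.2) PySem.Dict.empty doc_titles)
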